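-- pv_equiv track=rewrite | github.com/ciresdem/IVERT | src/s3.py | get_base_directory_before_glob
-- ===== SOURCE A (Python) =====
-- def get_base_directory_before_glob(s3_key):
--     """Return the base directory before any glob-style wildcard flags in an S3 key."""
--
--     dirs = s3_key.split("/")
--     basedirs = []
--     for dname in dirs:
--         if "*" in dname or "?" in dname or "[" in dname:
--             break
--         basedirs.append(dname)
--
--     return "/".join(basedirs)
-- ===== SOURCE B (Python) =====
-- def get_base_directory_before_glob(s3_key):
--     """Single left-to-right pass over the characters: keep the confirmed base
--     directory and the component currently being scanned; stop at the first
--     glob metacharacter (no component list is ever built)."""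
--     base = None
--     cur = []
--     for ch in s3_key:
--         if ch in "*?[":
--             return base if base is not None else ""
--         if ch == "/":
--             base = base + "/" + "".join(cur) if base is not None else "".join(cur)
--             cur = []
--         else:
--             cur.append(ch)
--     return s3_key
-- ===== Notes on version B (the rewrite author's own statement) =====
-- stated objective: alternative
-- what changed: B makes a single left-to-right pass over the characters, tracking the confirmed base directory and the component being scanned, instead of A's split on the separator, loop-with-break over the component list, and re-join.
import Mathlib
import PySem

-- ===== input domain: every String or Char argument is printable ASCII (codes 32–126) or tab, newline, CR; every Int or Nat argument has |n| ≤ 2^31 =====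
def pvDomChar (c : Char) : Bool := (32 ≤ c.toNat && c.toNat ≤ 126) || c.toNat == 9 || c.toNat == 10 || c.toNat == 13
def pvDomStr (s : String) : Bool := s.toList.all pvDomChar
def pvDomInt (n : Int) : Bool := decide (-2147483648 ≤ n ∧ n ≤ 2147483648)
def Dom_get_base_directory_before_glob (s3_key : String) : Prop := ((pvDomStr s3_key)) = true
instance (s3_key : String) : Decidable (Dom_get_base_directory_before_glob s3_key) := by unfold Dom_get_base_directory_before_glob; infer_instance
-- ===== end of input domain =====

-- B replaces A's split/loop/join over a component list by a single left-to-right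
-- pass over the characters (objective: alternative decomposition, same cost).

-- ===== PORT A =====
-- the for-loop with break over the split components
def pvALoop : List String → List String
  | [] => []
  | d :: rest =>
    if PySem.Str.isIn "*" d || PySem.Str.isIn "?" d || PySem.Str.isIn "[" d then []
    else d :: pvALoop rest

def get_base_directory_before_glob (s3_key : String) : String :=
  -- s3_key.split("/"): sep "/" is non-empty, so split? is always `some` here
  let dirs := (PySem.Str.split? s3_key "/").getD []
  PySem.Str.join "/" (pvALoop dirs)

-- ===== PORT B =====
def pvGlobChar (c : Char) : Bool := c == '*' || c == '?' || c == '['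

-- the for-loop of Source B: base = confirmed base directory (None until a '/' is
-- seen), cur = chars of the component being scanned; `some` = early return at a
-- glob char, `none` = loop fell through (Python then returns s3_key itself)
def pvAltGo : Option (List Char) → List Char → List Char → Option (List Char)
  | _base, _cur, [] => none
  | base, cur, c :: rest =>
    if pvGlobChar c then some (base.getD [])
    else if c == '/' then
      pvAltGo (some (match base with | some b => b ++ '/' :: cur | none => cur)) [] rest
    else pvAltGo base (cur ++ [c]) rest

def get_base_directory_before_glob_alt (s3_key : String) : String :=
  match pvAltGo none [] s3_key.toList with
  | some v => String.ofList v
  | none => s3_key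

-- ===== PRECONDITION & SPEC =====
def Spec_get_base_directory_before_glob (s3_key : String) (out : String) : Prop := out = get_base_directory_before_glob_alt s3_key
instance (s3_key : String) (out : String) : Decidable (Spec_get_base_directory_before_glob s3_key out) := by unfold Spec_get_base_directory_before_glob; infer_instance

-- ===== CLAIM (what is proved, stated in full; the proofs are below) =====
def Claim_equal_get_base_directory_before_glob : Prop := ∀ (s3_key : String), Dom_get_base_directory_before_glob s3_key → Spec_get_base_directory_before_glob s3_key (get_base_directory_before_glob s3_key)

-- ===== LEMMAS AND PROOFS =====

-- splitOn by a single '/' as a plain structural recursion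
def pvSplit1 : List Char → List (List Char)
  | [] => [[]]
  | c :: rest => if c = '/' then [] :: pvSplit1 rest else (pvSplit1 rest).modifyHead (c :: ·)

-- join with '/' as a plain structural recursion
def pvJoin1 : List (List Char) → List Char
  | [] => []
  | [x] => x
  | x :: y :: t => x ++ '/' :: pvJoin1 (y :: t)

-- component-level rendering of pvAltGo
def pvF : Option (List Char) → List (List Char) → Option (List Char)
  | _, [] => none
  | base, p :: ps =>
    if p.any pvGlobChar then some (base.getD [])
    else pvF (some (match base with | some b => b ++ '/' :: p | none => p)) ps

theorem pvSplit1_ne_nil (cs : List Char) : pvSplit1 cs ≠ [] := by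
  cases cs with
  | nil => simp [pvSplit1]
  | cons c rest =>
    simp only [pvSplit1]
    split_ifs
    · simp
    · cases h : pvSplit1 rest with
      | nil => exact absurd h (pvSplit1_ne_nil rest)
      | cons a t => simp [List.modifyHead]

theorem pvSplitOn_go_eq (fuel : Nat) (l cur : List Char) (acc : List (List Char))
    (h : l.length < fuel) :
    PySem.Chars.splitOn.go ['/'] fuel l cur acc
      = acc.reverse ++ (pvSplit1 l).modifyHead (cur.reverse ++ ·) := by
  induction fuel generalizing l cur acc with
  | zero => omega
  | succ f ih =>
    cases l with
    | nil => simp [PySem.Chars.splitOn.go, pvSplit1, List.modifyHead]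
    | cons c rest =>
      by_cases hc : c = '/'
      · subst hc
        have hpre : List.isPrefixOf ['/'] ('/' :: rest) = true := by
          simp [List.isPrefixOf]
        rw [PySem.Chars.splitOn.go]
        simp only [hpre, if_true, List.length_cons, List.length_nil, List.drop_succ_cons,
          List.drop_zero]
        rw [ih rest [] (cur.reverse :: acc) (by simp only [List.length_cons] at h; omega)]
        cases hps : pvSplit1 rest with
        | nil => exact absurd hps (pvSplit1_ne_nil rest)
        | cons a t => simp [pvSplit1, hps, List.modifyHead]
      · have hpre : List.isPrefixOf ['/'] (c :: rest) = false := by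
          simp only [List.isPrefixOf, Bool.and_eq_false_iff, beq_eq_false_iff_ne, ne_eq]
          left; exact Ne.symm hc
        rw [PySem.Chars.splitOn.go]
        simp only [hpre]
        rw [ih rest (c :: cur) acc (by simp only [List.length_cons] at h; omega)]
        simp only [pvSplit1, hc, if_false]
        cases hps : pvSplit1 rest with
        | nil => exact absurd hps (pvSplit1_ne_nil rest)
        | cons a t => simp [List.modifyHead]

theorem pvSplitOn_eq (cs : List Char) :
    PySem.Chars.splitOn cs ['/'] = pvSplit1 cs := by
  unfold PySem.Chars.splitOn
  rw [pvSplitOn_go_eq _ _ _ _ (by omega)]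
  cases h : pvSplit1 cs with
  | nil => exact absurd h (pvSplit1_ne_nil cs)
  | cons a t => simp [List.modifyHead]

theorem pvJoin_eq (ps : List (List Char)) :
    PySem.Chars.join ['/'] ps = pvJoin1 ps := by
  induction ps with
  | nil => simp [PySem.Chars.join, pvJoin1, List.intercalate]
  | cons x t ih =>
    cases t with
    | nil => simp [PySem.Chars.join, pvJoin1, List.intercalate]
    | cons y t' =>
      simp only [pvJoin1, ← ih]
      simp [PySem.Chars.join, List.intercalate, List.intersperse]

theorem pvJoin1_merge (b p : List Char) (ts : List (List Char)) :
    pvJoin1 ((b ++ '/' :: p) :: ts) = pvJoin1 (b :: p :: ts) := by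
  cases ts with
  | nil => simp [pvJoin1]
  | cons t ts' => simp [pvJoin1]

-- 'c in d' for one character is membership
theorem pvIsIn_single (c : Char) (s : List Char) :
    PySem.Chars.isIn [c] s = s.any (· == c) := by
  by_cases h : c ∈ s
  · have hinf : [c] <:+: s := by
      obtain ⟨l1, l2, rfl⟩ := List.append_of_mem h
      exact ⟨l1, l2, by simp⟩
    have h1 : PySem.Chars.isIn [c] s = true := by
      rw [PySem.Chars.isIn_iff_infix]; exact hinf
    rw [h1]
    symm
    rw [List.any_eq_true]
    exact ⟨c, h, by simp⟩
  · have h1 : PySem.Chars.isIn [c] s = false := by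
      rw [PySem.Chars.isIn_eq_false_iff]
      intro hinf
      exact h (hinf.subset (by simp))
    rw [h1]
    symm
    rw [List.any_eq_false]
    intro x hx
    simp only [beq_iff_eq]
    intro hxc; exact h (hxc ▸ hx)

theorem pvAnyOr (l : List Char) (f g : Char → Bool) :
    l.any (fun c => f c || g c) = (l.any f || l.any g) := by
  induction l with
  | nil => rfl
  | cons a t ih =>
    simp only [List.any_cons, ih]
    cases f a <;> cases g a <;> simp

theorem pvHasGlob_eq (p : List Char) :
    (PySem.Str.isIn "*" (String.ofList p) || PySem.Str.isIn "?" (String.ofList p)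
      || PySem.Str.isIn "[" (String.ofList p)) = p.any pvGlobChar := by
  simp only [PySem.Str.isIn]
  rw [show ("*" : String).toList = ['*'] from rfl, show ("?" : String).toList = ['?'] from rfl,
    show ("[" : String).toList = ['['] from rfl]
  simp only [String.toList_ofList, pvIsIn_single]
  have h1 : p.any pvGlobChar
      = ((p.any (· == '*') || p.any (· == '?')) || p.any (· == '[')) := by
    rw [show pvGlobChar = (fun c => (c == '*' || c == '?') || c == '[') from rfl,
      pvAnyOr, pvAnyOr]
  rw [h1]

theorem pvALoop_map (ps : List (List Char)) :
    pvALoop (ps.map String.ofList)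
      = (ps.takeWhile (fun p => !p.any pvGlobChar)).map String.ofList := by
  induction ps with
  | nil => simp [pvALoop]
  | cons p t ih =>
    simp only [List.map_cons, pvALoop, pvHasGlob_eq, List.takeWhile_cons]
    by_cases h : p.any pvGlobChar <;> simp [h, ih]

theorem pvAltGo_eq_pvF (cs : List Char) (base : Option (List Char)) (cur : List Char)
    (hcur : cur.any pvGlobChar = false) :
    pvAltGo base cur cs = pvF base ((pvSplit1 cs).modifyHead (cur ++ ·)) := by
  induction cs generalizing base cur with
  | nil =>
    simp [pvAltGo, pvSplit1, List.modifyHead, pvF, hcur]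
  | cons c rest ih =>
    by_cases hg : pvGlobChar c
    · have h1 : c ≠ '/' := by
        intro h; subst h; simp [pvGlobChar] at hg
      simp only [pvAltGo, hg, if_true, pvSplit1, h1, if_false]
      cases hps : pvSplit1 rest with
      | nil => exact absurd hps (pvSplit1_ne_nil rest)
      | cons a t =>
        have : (cur ++ c :: a).any pvGlobChar = true := by simp [hg]
        simp [List.modifyHead, pvF, this]
    · by_cases hc : c = '/'
      · subst hc
        simp only [pvAltGo, hg, if_false, beq_self_eq_true, if_true, pvSplit1]
        rw [ih _ [] rfl]
        cases hps : pvSplit1 rest with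
        | nil => exact absurd hps (pvSplit1_ne_nil rest)
        | cons a t => simp [List.modifyHead, pvF, hcur]
      · simp only [pvAltGo, hg, if_false, beq_iff_eq, hc, pvSplit1]
        rw [ih base (cur ++ [c]) (by simp [hcur, hg])]
        cases hps : pvSplit1 rest with
        | nil => exact absurd hps (pvSplit1_ne_nil rest)
        | cons a t => simp [List.modifyHead]

-- what pvF computes, in terms of takeWhile and pvJoin1
def pvJB : Option (List Char) → List (List Char) → List Char
  | none, ts => pvJoin1 ts
  | some b, ts => pvJoin1 (b :: ts)

theorem pvF_eq (ps : List (List Char)) (base : Option (List Char)) :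
    pvF base ps = if ps.all (fun p => !p.any pvGlobChar) then none
      else some (pvJB base (ps.takeWhile (fun p => !p.any pvGlobChar))) := by
  induction ps generalizing base with
  | nil => simp [pvF]
  | cons p t ih =>
    by_cases h : p.any pvGlobChar
    · rw [show pvF base (p :: t) = some (base.getD []) from by simp [pvF, h]]
      rw [if_neg (by simp [h])]
      rw [show (p :: t).takeWhile (fun q => !q.any pvGlobChar) = [] from by
        simp [List.takeWhile_cons, h]]
      cases base <;> simp [pvJB, pvJoin1]
    · rw [show pvF base (p :: t)
          = pvF (some (match base with | some b => b ++ '/' :: p | none => p)) t from by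
        simp [pvF, h]]
      rw [ih]
      rw [show (p :: t).all (fun q => !q.any pvGlobChar) = t.all (fun q => !q.any pvGlobChar)
        from by simp [h]]
      rw [show (p :: t).takeWhile (fun q => !q.any pvGlobChar)
          = p :: t.takeWhile (fun q => !q.any pvGlobChar) from by
        simp [List.takeWhile_cons, h]]
      split_ifs with h2
      · rfl
      · cases base with
        | none => simp [pvJB]
        | some b => simp [pvJB, pvJoin1_merge]

theorem pvJoin1_split1 (cs : List Char) : pvJoin1 (pvSplit1 cs) = cs := by
  induction cs with
  | nil => simp [pvSplit1, pvJoin1]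
  | cons c rest ih =>
    by_cases hc : c = '/'
    · subst hc
      simp only [pvSplit1, if_true]
      cases hps : pvSplit1 rest with
      | nil => exact absurd hps (pvSplit1_ne_nil rest)
      | cons a t => rw [hps] at ih; simp [pvJoin1, ih]
    · simp only [pvSplit1, hc, if_false]
      cases hps : pvSplit1 rest with
      | nil => exact absurd hps (pvSplit1_ne_nil rest)
      | cons a t =>
        rw [hps] at ih
        cases t with
        | nil => simpa [List.modifyHead, pvJoin1] using congrArg (c :: ·) ih
        | cons b t' => simpa [List.modifyHead, pvJoin1] using congrArg (c :: ·) ih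

-- A, rewritten through the chars-level pieces
theorem pvA_chars (s : String) :
    get_base_directory_before_glob s
      = String.ofList (pvJoin1 ((pvSplit1 s.toList).takeWhile (fun p => !p.any pvGlobChar))) := by
  unfold get_base_directory_before_glob
  have hsplit : PySem.Str.split? s "/" = some ((pvSplit1 s.toList).map String.ofList) := by
    simp only [PySem.Str.split?]
    have : ("/" : String).toList = ['/'] := rfl
    rw [this]
    simp [PySem.Chars.split?, pvSplitOn_eq]
  rw [hsplit]
  simp only [Option.getD_some, pvALoop_map]
  apply String.toList_injective
  rw [PySem.Str.toList_join]
  have : ("/" : String).toList = ['/'] := rfl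
  rw [this, pvJoin_eq]
  simp [List.map_map, Function.comp_def]

-- ===== VERDICT (by name: the statement is the Claim_ definition above) =====
theorem get_base_directory_before_glob_spec : Claim_equal_get_base_directory_before_glob := by
  intro s _
  unfold Spec_get_base_directory_before_glob get_base_directory_before_glob_alt
  rw [pvA_chars]
  rw [pvAltGo_eq_pvF s.toList none [] rfl]
  have hmod : (pvSplit1 s.toList).modifyHead (([] : List Char) ++ ·) = pvSplit1 s.toList := by
    cases h : pvSplit1 s.toList with
    | nil => rfl
    | cons a t => simp [List.modifyHead]
  rw [hmod, pvF_eq]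
  split_ifs with hall
  · have : (pvSplit1 s.toList).takeWhile (fun p => !p.any pvGlobChar) = pvSplit1 s.toList :=
      List.takeWhile_eq_self_iff.mpr (by simpa [List.all_eq_true] using hall)
    rw [this, pvJoin1_split1]
    simp
  · simp [pvJB]
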